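-- pv_equiv track=rewrite | github.com/olympei/platform-k8-gitops | scripts/split_gitlab_ci.py | find_job_boundaries
-- ===== SOURCE A (Python) =====
-- def find_job_boundaries(content):
--     """Find boundaries of different job sections"""
--     lines = content.split("\n")
--     boundaries = {
--         "validation_start": None,
--         "validation_end": None,
--         "helm_start": None,
--         "helm_end": None,
--         "k8s_start": None,
--         "k8s_end": None,
--         "verify_start": None,
--         "verify_end": None,
--     }
--
--     for i, line in enumerate(lines):
--         # Find validation jobs
--         if line.startswith("validate:helm:"):
--             boundaries["validation_start"] = i
--
--         # Find helm deployment jobs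
--         if line.startswith(".deploy_helm_hybrid:"):
--             boundaries["helm_start"] = i
--             if boundaries["validation_start"] is not None:
--                 boundaries["validation_end"] = i - 1
--
--         # Find k8s-resources jobs
--         if line.startswith(".uninstall_k8s_apps:"):
--             boundaries["k8s_start"] = i
--             if boundaries["helm_start"] is not None:
--                 boundaries["helm_end"] = i - 1
--
--         # Find verification jobs
--         if line.startswith(".verify_template:"):
--             boundaries["verify_start"] = i
--             if boundaries["k8s_start"] is not None:
--                 boundaries["k8s_end"] = i - 1
--
--     # Set end of verification to end of file
--     boundaries["verify_end"] = len(lines) - 1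
--
--     return boundaries
-- ===== SOURCE B (Python) =====
-- def find_job_boundaries(content):
--     """Find boundaries of different job sections"""
--     lines = content.split("\n")
--
--     def section_start(prefix):
--         return max((i for i, line in enumerate(lines) if line.startswith(prefix)),
--                    default=None)
--
--     def section_end(start, next_start):
--         if start is not None and next_start is not None:
--             return next_start - 1
--         return None
--
--     validation = section_start("validate:helm:")
--     helm = section_start(".deploy_helm_hybrid:")
--     k8s = section_start(".uninstall_k8s_apps:")
--     verify = section_start(".verify_template:")
--
--     return {
--         "validation_start": validation,
--         "validation_end": section_end(validation, helm),
--         "helm_start": helm,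
--         "helm_end": section_end(helm, k8s),
--         "k8s_start": k8s,
--         "k8s_end": section_end(k8s, verify),
--         "verify_start": verify,
--         "verify_end": len(lines) - 1,
--     }
-- ===== Notes on version B (the rewrite author's own statement) =====
-- stated objective: simpler
-- what changed: A's single stateful pass mutating a dict with in-loop gating of the *_end fields is replaced by computing each section's start as the max line index matching its prefix and each end as the next section's start minus one when both sections exist; Pre_ excludes malformed inputs whose adjacent section markers appear out of order, where A reports the *_end as None and B as next_start - 1, both defensible readings of an unspecified boundary.
import Mathlib
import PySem

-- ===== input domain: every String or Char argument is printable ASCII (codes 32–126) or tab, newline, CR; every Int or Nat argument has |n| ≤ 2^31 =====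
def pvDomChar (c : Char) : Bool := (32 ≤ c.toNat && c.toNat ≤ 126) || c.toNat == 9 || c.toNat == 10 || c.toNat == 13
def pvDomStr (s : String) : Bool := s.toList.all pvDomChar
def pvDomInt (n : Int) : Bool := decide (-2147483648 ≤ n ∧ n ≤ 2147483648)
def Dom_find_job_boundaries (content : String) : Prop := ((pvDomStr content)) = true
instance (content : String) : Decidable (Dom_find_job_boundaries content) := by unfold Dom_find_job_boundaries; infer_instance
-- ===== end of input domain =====

-- B replaces A's stateful single pass (a dict mutated with in-loop gating) by
-- computing each section start as the max matching line index and each end as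
-- the next start minus one (objective: simpler; no speed claim).

-- ===== PORT A =====
-- A-side helpers: the initial dict literal and the body of A's for-loop.
def fjb_init : PySem.Dict String (Option Int) :=
  PySem.Dict.ofList [("validation_start", none), ("validation_end", none),
    ("helm_start", none), ("helm_end", none), ("k8s_start", none), ("k8s_end", none),
    ("verify_start", none), ("verify_end", none)]

def fjb_step (b : PySem.Dict String (Option Int)) (il : Int × String) :
    PySem.Dict String (Option Int) :=
  let i := il.1
  let line := il.2
  let b := if PySem.Str.startswith line "validate:helm:" then
      b.insert "validation_start" (some i) else b
  let b := if PySem.Str.startswith line ".deploy_helm_hybrid:" then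
      let b := b.insert "helm_start" (some i)
      if (b.getD "validation_start" none).isSome then b.insert "validation_end" (some (i - 1)) else b
    else b
  let b := if PySem.Str.startswith line ".uninstall_k8s_apps:" then
      let b := b.insert "k8s_start" (some i)
      if (b.getD "helm_start" none).isSome then b.insert "helm_end" (some (i - 1)) else b
    else b
  if PySem.Str.startswith line ".verify_template:" then
      let b := b.insert "verify_start" (some i)
      if (b.getD "k8s_start" none).isSome then b.insert "k8s_end" (some (i - 1)) else b
    else b

def find_job_boundaries (content : String) : List (String × Option Int) :=
  let lines := (PySem.Str.split? content "\n").getD []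
  let boundaries := (PySem.List.enumerate lines 0).foldl fjb_step fjb_init
  (boundaries.insert "verify_end" (some ((lines.length : Int) - 1))).items

-- ===== PORT B =====
-- B-side helpers: start = max line index matching the prefix; end = next start - 1.
def fjb_section_start (lines : List String) (pfx : String) : Option Int :=
  PySem.List.max?
    (((PySem.List.enumerate lines 0).filter
        (fun il => PySem.Str.startswith il.2 pfx)).map (·.1))
    (fun x => x)

def fjb_section_end (start nextStart : Option Int) : Option Int :=
  match start, nextStart with
  | some _, some n => some (n - 1)
  | _, _ => none

def find_job_boundaries_alt (content : String) : List (String × Option Int) :=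
  let lines := (PySem.Str.split? content "\n").getD []
  let validation := fjb_section_start lines "validate:helm:"
  let helm := fjb_section_start lines ".deploy_helm_hybrid:"
  let k8s := fjb_section_start lines ".uninstall_k8s_apps:"
  let verify := fjb_section_start lines ".verify_template:"
  [("validation_start", validation), ("validation_end", fjb_section_end validation helm),
   ("helm_start", helm), ("helm_end", fjb_section_end helm k8s),
   ("k8s_start", k8s), ("k8s_end", fjb_section_end k8s verify),
   ("verify_start", verify), ("verify_end", some ((lines.length : Int) - 1))]

-- ===== PRECONDITION & SPEC =====
-- helper used by Pre_: the line indices starting with a prefix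
def fjb_idxs (lines : List String) (pfx : String) : List Int :=
  ((PySem.List.enumerate lines 0).filter (fun il => PySem.Str.startswith il.2 pfx)).map (·.1)

def fjb_ordB (l : List String) (p q : String) : Bool :=
  match (fjb_idxs l p).head?, (fjb_idxs l q).getLast? with
  | some a, some b => decide (a < b)
  | _, _ => true

-- Pre_ excludes inputs whose adjacent section markers appear out of order (the previous
-- prefix's first matching line not before the next prefix's last matching line), i.e.
-- malformed CI files: there A reports the corresponding *_end as None while B reports
-- next_start - 1, both defensible readings of a boundary no one specified.
def Pre_find_job_boundaries (content : String) : Prop :=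
  let lines := (PySem.Str.split? content "\n").getD []
  fjb_ordB lines "validate:helm:" ".deploy_helm_hybrid:" = true ∧
  fjb_ordB lines ".deploy_helm_hybrid:" ".uninstall_k8s_apps:" = true ∧
  fjb_ordB lines ".uninstall_k8s_apps:" ".verify_template:" = true
instance (content : String) : Decidable (Pre_find_job_boundaries content) := by
  unfold Pre_find_job_boundaries; infer_instance

def pvWitness_find_job_boundaries : String :=
  "validate:helm:app\n.deploy_helm_hybrid:\n.uninstall_k8s_apps:\n.verify_template:\nend"

def Spec_find_job_boundaries (content : String) (out : List (String × Option Int)) : Prop := out = find_job_boundaries_alt content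
instance (content : String) (out : List (String × Option Int)) : Decidable (Spec_find_job_boundaries content out) := by unfold Spec_find_job_boundaries; infer_instance

-- ===== CLAIM (what is proved, stated in full; the proofs are below) =====
def Claim_equal_find_job_boundaries : Prop := ∀ (content : String), Dom_find_job_boundaries content → Pre_find_job_boundaries content → Spec_find_job_boundaries content (find_job_boundaries content)

-- ===== LEMMAS AND PROOFS =====

-- A's 7 evolving dict values (verify_end never changes inside the loop)
def fjbState := Option Int × Option Int × Option Int × Option Int × Option Int × Option Int × Option Int

def fjb_mk (t : fjbState) : PySem.Dict String (Option Int) :=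
  PySem.Dict.ofList [("validation_start", t.1), ("validation_end", t.2.1),
    ("helm_start", t.2.2.1), ("helm_end", t.2.2.2.1), ("k8s_start", t.2.2.2.2.1),
    ("k8s_end", t.2.2.2.2.2.1), ("verify_start", t.2.2.2.2.2.2), ("verify_end", none)]

-- the four branches of A's loop body, on the dict
def fjbA1 (b : PySem.Dict String (Option Int)) (il : Int × String) : PySem.Dict String (Option Int) :=
  if PySem.Str.startswith il.2 "validate:helm:" then b.insert "validation_start" (some il.1) else b

def fjbA2 (b : PySem.Dict String (Option Int)) (il : Int × String) : PySem.Dict String (Option Int) :=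
  if PySem.Str.startswith il.2 ".deploy_helm_hybrid:" then
    let b := b.insert "helm_start" (some il.1)
    if (b.getD "validation_start" none).isSome then b.insert "validation_end" (some (il.1 - 1)) else b
  else b

def fjbA3 (b : PySem.Dict String (Option Int)) (il : Int × String) : PySem.Dict String (Option Int) :=
  if PySem.Str.startswith il.2 ".uninstall_k8s_apps:" then
    let b := b.insert "k8s_start" (some il.1)
    if (b.getD "helm_start" none).isSome then b.insert "helm_end" (some (il.1 - 1)) else b
  else b

def fjbA4 (b : PySem.Dict String (Option Int)) (il : Int × String) : PySem.Dict String (Option Int) :=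
  if PySem.Str.startswith il.2 ".verify_template:" then
    let b := b.insert "verify_start" (some il.1)
    if (b.getD "k8s_start" none).isSome then b.insert "k8s_end" (some (il.1 - 1)) else b
  else b

-- the same four branches, on the 7 values
def fjbT1 (t : fjbState) (il : Int × String) : fjbState :=
  (if PySem.Str.startswith il.2 "validate:helm:" then some il.1 else t.1, t.2)

def fjbT2 (t : fjbState) (il : Int × String) : fjbState :=
  (t.1,
   if PySem.Str.startswith il.2 ".deploy_helm_hybrid:" ∧ t.1.isSome then some (il.1 - 1) else t.2.1,
   (if PySem.Str.startswith il.2 ".deploy_helm_hybrid:" then some il.1 else t.2.2.1),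
   t.2.2.2)

def fjbT3 (t : fjbState) (il : Int × String) : fjbState :=
  (t.1, t.2.1, t.2.2.1,
   (if PySem.Str.startswith il.2 ".uninstall_k8s_apps:" ∧ t.2.2.1.isSome then some (il.1 - 1) else t.2.2.2.1),
   (if PySem.Str.startswith il.2 ".uninstall_k8s_apps:" then some il.1 else t.2.2.2.2.1),
   t.2.2.2.2.2)

def fjbT4 (t : fjbState) (il : Int × String) : fjbState :=
  (t.1, t.2.1, t.2.2.1, t.2.2.2.1, t.2.2.2.2.1,
   (if PySem.Str.startswith il.2 ".verify_template:" ∧ t.2.2.2.2.1.isSome then some (il.1 - 1) else t.2.2.2.2.2.1),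
   (if PySem.Str.startswith il.2 ".verify_template:" then some il.1 else t.2.2.2.2.2.2))

def fjb_tstep (t : fjbState) (il : Int × String) : fjbState :=
  fjbT4 (fjbT3 (fjbT2 (fjbT1 t il) il) il) il

-- the gated end rule A's loop realises: first prev occurrence before last next occurrence
def fjb_end_before (prevFirst nextLast : Option Int) : Option Int :=
  match nextLast, prevFirst with
  | some nl, some pf => if pf < nl then some (nl - 1) else none
  | _, _ => none

-- the closed form A's fold reaches, as the same 7-tuple
def fjb_closed (l : List String) : fjbState :=
  let V := fjb_idxs l "validate:helm:"
  let H := fjb_idxs l ".deploy_helm_hybrid:"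
  let K := fjb_idxs l ".uninstall_k8s_apps:"
  let R := fjb_idxs l ".verify_template:"
  (V.getLast?, fjb_end_before V.head? H.getLast?,
   H.getLast?, fjb_end_before H.head? K.getLast?,
   K.getLast?, fjb_end_before K.head? R.getLast?,
   R.getLast?)

-- dict computations on the 8-key literal
theorem fjb_ins_vs (vs ve hs he ks ke rs v : Option Int) :
    (fjb_mk (vs,ve,hs,he,ks,ke,rs)).insert "validation_start" v = fjb_mk (v,ve,hs,he,ks,ke,rs) := by
  simp [fjb_mk, PySem.Dict.ofList, PySem.Dict.insert, PySem.Dict.update, PySem.Dict.empty, PySem.Dict.contains]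

theorem fjb_ins_ve (vs ve hs he ks ke rs v : Option Int) :
    (fjb_mk (vs,ve,hs,he,ks,ke,rs)).insert "validation_end" v = fjb_mk (vs,v,hs,he,ks,ke,rs) := by
  simp [fjb_mk, PySem.Dict.ofList, PySem.Dict.insert, PySem.Dict.update, PySem.Dict.empty, PySem.Dict.contains]

theorem fjb_ins_hs (vs ve hs he ks ke rs v : Option Int) :
    (fjb_mk (vs,ve,hs,he,ks,ke,rs)).insert "helm_start" v = fjb_mk (vs,ve,v,he,ks,ke,rs) := by
  simp [fjb_mk, PySem.Dict.ofList, PySem.Dict.insert, PySem.Dict.update, PySem.Dict.empty, PySem.Dict.contains]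

theorem fjb_ins_he (vs ve hs he ks ke rs v : Option Int) :
    (fjb_mk (vs,ve,hs,he,ks,ke,rs)).insert "helm_end" v = fjb_mk (vs,ve,hs,v,ks,ke,rs) := by
  simp [fjb_mk, PySem.Dict.ofList, PySem.Dict.insert, PySem.Dict.update, PySem.Dict.empty, PySem.Dict.contains]

theorem fjb_ins_ks (vs ve hs he ks ke rs v : Option Int) :
    (fjb_mk (vs,ve,hs,he,ks,ke,rs)).insert "k8s_start" v = fjb_mk (vs,ve,hs,he,v,ke,rs) := by
  simp [fjb_mk, PySem.Dict.ofList, PySem.Dict.insert, PySem.Dict.update, PySem.Dict.empty, PySem.Dict.contains]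

theorem fjb_ins_ke (vs ve hs he ks ke rs v : Option Int) :
    (fjb_mk (vs,ve,hs,he,ks,ke,rs)).insert "k8s_end" v = fjb_mk (vs,ve,hs,he,ks,v,rs) := by
  simp [fjb_mk, PySem.Dict.ofList, PySem.Dict.insert, PySem.Dict.update, PySem.Dict.empty, PySem.Dict.contains]

theorem fjb_ins_rs (vs ve hs he ks ke rs v : Option Int) :
    (fjb_mk (vs,ve,hs,he,ks,ke,rs)).insert "verify_start" v = fjb_mk (vs,ve,hs,he,ks,ke,v) := by
  simp [fjb_mk, PySem.Dict.ofList, PySem.Dict.insert, PySem.Dict.update, PySem.Dict.empty, PySem.Dict.contains]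

theorem fjb_getD_vs (vs ve hs he ks ke rs : Option Int) :
    (fjb_mk (vs,ve,hs,he,ks,ke,rs)).getD "validation_start" none = vs := by
  simp [fjb_mk, PySem.Dict.ofList, PySem.Dict.insert, PySem.Dict.update, PySem.Dict.empty,
        PySem.Dict.contains, PySem.Dict.getD, PySem.Dict.get?]

theorem fjb_getD_hs (vs ve hs he ks ke rs : Option Int) :
    (fjb_mk (vs,ve,hs,he,ks,ke,rs)).getD "helm_start" none = hs := by
  simp [fjb_mk, PySem.Dict.ofList, PySem.Dict.insert, PySem.Dict.update, PySem.Dict.empty,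
        PySem.Dict.contains, PySem.Dict.getD, PySem.Dict.get?]

theorem fjb_getD_ks (vs ve hs he ks ke rs : Option Int) :
    (fjb_mk (vs,ve,hs,he,ks,ke,rs)).getD "k8s_start" none = ks := by
  simp [fjb_mk, PySem.Dict.ofList, PySem.Dict.insert, PySem.Dict.update, PySem.Dict.empty,
        PySem.Dict.contains, PySem.Dict.getD, PySem.Dict.get?]

theorem fjb_items_mk (t : fjbState) (w : Option Int) :
    ((fjb_mk t).insert "verify_end" w).items =
      [("validation_start", t.1), ("validation_end", t.2.1), ("helm_start", t.2.2.1),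
       ("helm_end", t.2.2.2.1), ("k8s_start", t.2.2.2.2.1), ("k8s_end", t.2.2.2.2.2.1),
       ("verify_start", t.2.2.2.2.2.2), ("verify_end", w)] := by
  simp [fjb_mk, PySem.Dict.ofList, PySem.Dict.insert, PySem.Dict.update, PySem.Dict.empty,
        PySem.Dict.contains]

theorem fjbA1_mk (t : fjbState) (il : Int × String) : fjbA1 (fjb_mk t) il = fjb_mk (fjbT1 t il) := by
  obtain ⟨vs, ve, hs, he, ks, ke, rs⟩ := t
  cases hsw : PySem.Str.startswith il.2 "validate:helm:" with
  | false => simp only [fjbA1, fjbT1, hsw]; simp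
  | true => simp only [fjbA1, fjbT1, hsw]; simp [fjb_ins_vs]

theorem fjbA2_mk (t : fjbState) (il : Int × String) : fjbA2 (fjb_mk t) il = fjb_mk (fjbT2 t il) := by
  obtain ⟨vs, ve, hs, he, ks, ke, rs⟩ := t
  cases hsw : PySem.Str.startswith il.2 ".deploy_helm_hybrid:" with
  | false => simp only [fjbA2, fjbT2, hsw]; simp
  | true =>
    simp only [fjbA2, fjbT2, hsw]
    rw [fjb_ins_hs, fjb_getD_vs]
    cases hv : vs.isSome with
    | false => simp
    | true =>
      simp only [hv, if_true]
      simp [fjb_ins_ve]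

theorem fjbA3_mk (t : fjbState) (il : Int × String) : fjbA3 (fjb_mk t) il = fjb_mk (fjbT3 t il) := by
  obtain ⟨vs, ve, hs, he, ks, ke, rs⟩ := t
  cases hsw : PySem.Str.startswith il.2 ".uninstall_k8s_apps:" with
  | false => simp only [fjbA3, fjbT3, hsw]; simp
  | true =>
    simp only [fjbA3, fjbT3, hsw]
    rw [fjb_ins_ks, fjb_getD_hs]
    cases hv : hs.isSome with
    | false => simp
    | true =>
      simp only [hv, if_true]
      simp [fjb_ins_he]

theorem fjbA4_mk (t : fjbState) (il : Int × String) : fjbA4 (fjb_mk t) il = fjb_mk (fjbT4 t il) := by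
  obtain ⟨vs, ve, hs, he, ks, ke, rs⟩ := t
  cases hsw : PySem.Str.startswith il.2 ".verify_template:" with
  | false => simp only [fjbA4, fjbT4, hsw]; simp
  | true =>
    simp only [fjbA4, fjbT4, hsw]
    rw [fjb_ins_rs, fjb_getD_ks]
    cases hv : ks.isSome with
    | false => simp
    | true =>
      simp only [hv, if_true]
      simp [fjb_ins_ke]

theorem fjb_step_comp (b : PySem.Dict String (Option Int)) (il : Int × String) :
    fjb_step b il = fjbA4 (fjbA3 (fjbA2 (fjbA1 b il) il) il) il := rfl

theorem fjb_step_mk (t : fjbState) (il : Int × String) :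
    fjb_step (fjb_mk t) il = fjb_mk (fjb_tstep t il) := by
  rw [fjb_step_comp, fjbA1_mk, fjbA2_mk, fjbA3_mk, fjbA4_mk]
  rfl

theorem fjb_fold_mk (es : List (Int × String)) (t : fjbState) :
    es.foldl fjb_step (fjb_mk t) = fjb_mk (es.foldl fjb_tstep t) := by
  induction es generalizing t with
  | nil => simp only [List.foldl_nil]
  | cons e es ih => simp only [List.foldl_cons]; rw [fjb_step_mk, ih]

theorem fjb_idxs_lt (lines : List String) (pfx : String) :
    ∀ j ∈ fjb_idxs lines pfx, j < (lines.length : Int) := by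
  intro j hj
  simp only [fjb_idxs, List.mem_map, List.mem_filter] at hj
  obtain ⟨il, ⟨hmem, _⟩, hfst⟩ := hj
  rw [PySem.List.mem_enumerate_iff] at hmem
  obtain ⟨k, hk, rfl⟩ := hmem
  simp at hfst ⊢
  omega

theorem fjb_idxs_snoc (lines : List String) (x : String) (pfx : String) :
    fjb_idxs (lines ++ [x]) pfx =
      fjb_idxs lines pfx ++
        (if PySem.Str.startswith x pfx then [(lines.length : Int)] else []) := by
  simp only [fjb_idxs, PySem.List.enumerate_append, PySem.List.enumerate_cons,
    PySem.List.enumerate_nil, List.filter_append, List.map_append, zero_add]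
  cases h : PySem.Str.startswith x pfx <;> rw [PySem.Str.startswith_eq] at h <;> simp [h]

theorem fjb_excl (x p q : String) (hpq : ¬ p.toList <+: q.toList) (hqp : ¬ q.toList <+: p.toList)
    (hp : PySem.Str.startswith x p = true) : PySem.Str.startswith x q = false := by
  by_contra h
  rw [Bool.not_eq_false] at h
  rw [PySem.Str.startswith_eq, PySem.Chars.startswith_iff] at hp h
  rcases List.prefix_or_prefix_of_prefix hp h with hc | hc
  · exact hpq hc
  · exact hqp hc

theorem fjb_head_lt (l : List String) (p : String) (j : Int)
    (h : (fjb_idxs l p).head? = some j) : j < (l.length : Int) :=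
  fjb_idxs_lt l p j (List.mem_of_mem_head? h)

theorem fjb_last_lt (l : List String) (p : String) (j : Int)
    (h : (fjb_idxs l p).getLast? = some j) : j < (l.length : Int) :=
  fjb_idxs_lt l p j (List.mem_of_mem_getLast? h)

theorem fjb_eb_some_n (f : Option Int) (n : Int) (hb : ∀ j, f = some j → j < n) :
    fjb_end_before f (some n) = if f.isSome then some (n - 1) else none := by
  cases f with
  | none => simp [fjb_end_before]
  | some j => simp [fjb_end_before, hb j rfl]

theorem fjb_eb_none (L : Option Int) : fjb_end_before none L = none := by cases L <;> rfl

theorem fjb_eb_getD (F lst : Option Int) (n : Int) (hb : ∀ j, lst = some j → j < n) :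
    fjb_end_before (some (F.getD n)) lst = fjb_end_before F lst := by
  cases F with
  | some f => rfl
  | none =>
    cases lst with
    | none => rfl
    | some j =>
      have := hb j rfl
      simp [fjb_end_before, show ¬ n < j by omega]

theorem fjb_gate' (l : List String) (p : String) (O : Option Int)
    (hO : fjb_idxs l p = [] → O = none) :
    (if fjb_idxs l p = [] then O else some ((l.length : Int) - 1)) =
      fjb_end_before ((fjb_idxs l p).head?) (some ((l.length : Int))) := by
  by_cases hE : fjb_idxs l p = []
  · rw [if_pos hE, hO hE, hE]; rfl
  · rw [if_neg hE, fjb_eb_some_n _ _ (fjb_head_lt l p)]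
    obtain ⟨a, t, hat⟩ := List.exists_cons_of_ne_nil hE
    rw [hat]; simp

theorem fjb_tstep_closed (l : List String) (x : String) :
    fjb_tstep (fjb_closed l) ((l.length : Int), x) = fjb_closed (l ++ [x]) := by
  by_cases h1 : PySem.Str.startswith x "validate:helm:" = true
  · have h2 : PySem.Str.startswith x ".deploy_helm_hybrid:" = false :=
      fjb_excl x "validate:helm:" ".deploy_helm_hybrid:" (by decide) (by decide) h1
    have h3 : PySem.Str.startswith x ".uninstall_k8s_apps:" = false :=
      fjb_excl x "validate:helm:" ".uninstall_k8s_apps:" (by decide) (by decide) h1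
    have h4 : PySem.Str.startswith x ".verify_template:" = false :=
      fjb_excl x "validate:helm:" ".verify_template:" (by decide) (by decide) h1
    simp at h1 h2 h3 h4
    simp [fjb_tstep, fjbT1, fjbT2, fjbT3, fjbT4, fjb_closed, fjb_idxs_snoc, h1, h2, h3, h4, List.head?_append, List.getLast?_append, fjb_eb_none]
    rw [fjb_eb_getD _ _ _ (fjb_last_lt l ".deploy_helm_hybrid:")]
  · by_cases h2 : PySem.Str.startswith x ".deploy_helm_hybrid:" = true
    · have h3 : PySem.Str.startswith x ".uninstall_k8s_apps:" = false :=
        fjb_excl x ".deploy_helm_hybrid:" ".uninstall_k8s_apps:" (by decide) (by decide) h2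
      have h4 : PySem.Str.startswith x ".verify_template:" = false :=
        fjb_excl x ".deploy_helm_hybrid:" ".verify_template:" (by decide) (by decide) h2
      simp at h1 h2 h3 h4
      simp [fjb_tstep, fjbT1, fjbT2, fjbT3, fjbT4, fjb_closed, fjb_idxs_snoc, h1, h2, h3, h4, List.head?_append, List.getLast?_append, fjb_eb_none]
      rw [fjb_eb_getD _ _ _ (fjb_last_lt l ".uninstall_k8s_apps:"), fjb_gate' l "validate:helm:" _ (fun hE => by rw [hE]; exact fjb_eb_none _)]
    · by_cases h3 : PySem.Str.startswith x ".uninstall_k8s_apps:" = true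
      · have h4 : PySem.Str.startswith x ".verify_template:" = false :=
          fjb_excl x ".uninstall_k8s_apps:" ".verify_template:" (by decide) (by decide) h3
        simp at h1 h2 h3 h4
        simp [fjb_tstep, fjbT1, fjbT2, fjbT3, fjbT4, fjb_closed, fjb_idxs_snoc, h1, h2, h3, h4, List.head?_append, List.getLast?_append, fjb_eb_none]
        rw [fjb_eb_getD _ _ _ (fjb_last_lt l ".verify_template:"), fjb_gate' l ".deploy_helm_hybrid:" _ (fun hE => by rw [hE]; exact fjb_eb_none _)]
      · by_cases h4 : PySem.Str.startswith x ".verify_template:" = true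
        · simp at h1 h2 h3 h4
          simp [fjb_tstep, fjbT1, fjbT2, fjbT3, fjbT4, fjb_closed, fjb_idxs_snoc, h1, h2, h3, h4, List.head?_append, List.getLast?_append, fjb_eb_none]
          rw [fjb_gate' l ".uninstall_k8s_apps:" _ (fun hE => by rw [hE]; exact fjb_eb_none _)]
        · simp at h1 h2 h3 h4
          simp [fjb_tstep, fjbT1, fjbT2, fjbT3, fjbT4, fjb_closed, fjb_idxs_snoc, h1, h2, h3, h4, List.head?_append, List.getLast?_append, fjb_eb_none]

theorem fjb_closed_fold (lines : List String) :
    (PySem.List.enumerate lines 0).foldl fjb_tstep (none, none, none, none, none, none, none) =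
      fjb_closed lines := by
  induction lines using List.reverseRecOn with
  | nil => rfl
  | append_singleton l x ih =>
    rw [PySem.List.enumerate_append, List.foldl_append, ih]
    simp only [PySem.List.enumerate_cons, PySem.List.enumerate_nil, List.foldl_cons,
      List.foldl_nil, zero_add]
    exact fjb_tstep_closed l x

-- B's section_start computes the last matching index
theorem fjb_max_snoc (xs : List Int) (n : Int) (h : ∀ y ∈ xs, y < n) :
    PySem.List.max? (xs ++ [n]) (fun x => x) = some n := by
  cases heq : PySem.List.max? (xs ++ [n]) (fun x => x) with
  | none =>
    have := (PySem.List.max?_eq_none_iff (xs := xs ++ [n]) (key := fun x => x)).mp heq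
    simp at this
  | some m =>
    have hm := PySem.List.max?_mem heq
    have hmax := PySem.List.max?_isMax heq n (by simp)
    have hmn : m = n := by
      rcases List.mem_append.mp hm with hx | hx
      · have := h m hx; simp only at hmax; omega
      · simpa using hx
    rw [hmn]

theorem fjb_start_eq (lines : List String) (pfx : String) :
    fjb_section_start lines pfx = (fjb_idxs lines pfx).getLast? := by
  induction lines using List.reverseRecOn with
  | nil => rfl
  | append_singleton l x ih =>
    have hsnoc := fjb_idxs_snoc l x pfx
    show PySem.List.max? (fjb_idxs (l ++ [x]) pfx) (fun y => y) = (fjb_idxs (l ++ [x]) pfx).getLast?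
    rw [hsnoc]
    split_ifs with h
    · rw [fjb_max_snoc _ _ (fjb_idxs_lt l pfx)]
      simp
    · simp only [List.append_nil]
      exact ih

-- head? and getLast? of fjb_idxs are some-together; Pre_'s ordering closes the gate
theorem fjb_end_match (l : List String) (p q : String) (h : fjb_ordB l p q = true) :
    fjb_end_before (fjb_idxs l p).head? ((fjb_idxs l q).getLast?) =
      fjb_section_end ((fjb_idxs l p).getLast?) ((fjb_idxs l q).getLast?) := by
  cases hP : fjb_idxs l p with
  | nil => cases (fjb_idxs l q).getLast? <;> rfl
  | cons a ps =>
    obtain ⟨c, hlastP⟩ := Option.isSome_iff_exists.mp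
      (show ((a :: ps : List Int)).getLast?.isSome by simp)
    cases hQ : (fjb_idxs l q).getLast? with
    | none => rw [hlastP]; rfl
    | some b =>
      unfold fjb_ordB at h
      rw [hP, hQ] at h
      simp only [List.head?_cons] at h
      have hab : a < b := by simpa using h
      rw [hlastP]
      simp [fjb_end_before, fjb_section_end, hab]

-- ===== VERDICT (by name: the statement is the Claim_ definition above) =====
theorem find_job_boundaries_spec : Claim_equal_find_job_boundaries := by
  intro content _ hpre
  unfold Pre_find_job_boundaries at hpre
  show find_job_boundaries content = find_job_boundaries_alt content
  simp only [find_job_boundaries, find_job_boundaries_alt]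
  generalize hL : (PySem.Str.split? content "\n").getD [] = lines at hpre ⊢
  obtain ⟨h1, h2, h3⟩ := hpre
  have h0 : fjb_init = fjb_mk (none, none, none, none, none, none, none) := rfl
  rw [h0, fjb_fold_mk, fjb_closed_fold, fjb_items_mk]
  simp only [fjb_closed, fjb_start_eq]
  rw [fjb_end_match _ _ _ h1, fjb_end_match _ _ _ h2, fjb_end_match _ _ _ h3]
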